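-- pv_equiv track=rewrite | github.com/PavelShpagin/AQUA | processing/tnfn.py | expand_to_tnfn
-- ===== SOURCE A (Python) =====
-- from typing import List, Tuple, Dict
--
-- def expand_to_tnfn(pairs: List[Tuple[str, str, str]]) -> Tuple[List[Dict], List[Dict]]:
--     tn: List[Dict] = []
--     fn: List[Dict] = []
--     for dataset, src, tgt in pairs:
--         if src == tgt:
--             tn.append({'src': src, 'tgt': tgt, 'tp_fp_label': 'TN'})
--         else:
--             fn.append({'src': src, 'tgt': src, 'tp_fp_label': 'FN'})
--             tn.append({'src': tgt, 'tgt': tgt, 'tp_fp_label': 'TN'})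
--     return tn, fn
-- ===== SOURCE B (Python) =====
-- from typing import List, Tuple, Dict
--
-- def expand_to_tnfn(pairs: List[Tuple[str, str, str]]) -> Tuple[List[Dict], List[Dict]]:
--     # Structural recursion on the list: split off the head, recurse on the tail,
--     # and cons the head's contributions in front. The TN entry is uniform
--     # ({'src': tgt, ...} equals A's src-based entry exactly when src == tgt).
--     if not pairs:
--         return [], []
--     (dataset, src, tgt), rest = pairs[0], pairs[1:]
--     tn, fn = expand_to_tnfn(rest)
--     head_fn = [] if src == tgt else [{'src': src, 'tgt': src, 'tp_fp_label': 'FN'}]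
--     return [{'src': tgt, 'tgt': tgt, 'tp_fp_label': 'TN'}] + tn, head_fn + fn
-- ===== Notes on version B (the rewrite author's own statement) =====
-- stated objective: alternative
-- what changed: Replaced A's single interleaved imperative loop that appends to two accumulators with a structural recursion that recurses on the tail and conses each head's contributions in front, using that the TN entry is uniformly tgt-based so the branch only decides the FN contribution.
import Mathlib
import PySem

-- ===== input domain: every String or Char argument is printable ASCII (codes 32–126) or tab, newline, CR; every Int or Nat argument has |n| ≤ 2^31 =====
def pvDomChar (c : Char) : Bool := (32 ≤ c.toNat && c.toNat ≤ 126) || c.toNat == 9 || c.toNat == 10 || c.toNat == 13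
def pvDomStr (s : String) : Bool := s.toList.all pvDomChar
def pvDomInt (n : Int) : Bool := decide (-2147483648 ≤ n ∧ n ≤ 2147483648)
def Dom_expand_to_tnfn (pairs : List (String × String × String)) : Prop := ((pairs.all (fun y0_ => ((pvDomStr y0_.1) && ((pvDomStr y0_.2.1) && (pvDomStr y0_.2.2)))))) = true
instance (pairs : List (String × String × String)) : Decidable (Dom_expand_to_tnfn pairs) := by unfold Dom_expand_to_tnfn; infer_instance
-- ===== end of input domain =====

-- B replaces A's interleaved appending loop by structural recursion that conses head contributions onto the recursive result (objective: alternative decomposition).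

-- ===== PORT A =====
-- One interleaved pass; tn/fn built by appending, branch on src == tgt (as in A)
def expand_to_tnfn (pairs : List (String × String × String)) : (List (List (String × String))) × (List (List (String × String))) :=
  pairs.foldl (fun (acc : List (List (String × String)) × List (List (String × String))) p =>
    let (_dataset, src, tgt) := p
    if src == tgt then
      (acc.1 ++ [[("src", src), ("tgt", tgt), ("tp_fp_label", "TN")]], acc.2)
    else
      (acc.1 ++ [[("src", tgt), ("tgt", tgt), ("tp_fp_label", "TN")]],
       acc.2 ++ [[("src", src), ("tgt", src), ("tp_fp_label", "FN")]]))
    ([], [])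

-- ===== PORT B =====
-- B: structural recursion; recurse on the tail, cons the head's contributions in front
def expand_to_tnfn_alt : List (String × String × String) → (List (List (String × String))) × (List (List (String × String)))
  | [] => ([], [])
  | (_dataset, src, tgt) :: rest =>
    let (tn, fn) := expand_to_tnfn_alt rest
    ([("src", tgt), ("tgt", tgt), ("tp_fp_label", "TN")] :: tn,
     (if src == tgt then [] else [[("src", src), ("tgt", src), ("tp_fp_label", "FN")]]) ++ fn)

-- ===== PRECONDITION & SPEC =====
def Spec_expand_to_tnfn (pairs : List (String × String × String)) (out : (List (List (String × String))) × (List (List (String × String)))) : Prop := out = expand_to_tnfn_alt pairs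
instance (pairs : List (String × String × String)) (out : (List (List (String × String))) × (List (List (String × String)))) : Decidable (Spec_expand_to_tnfn pairs out) := by unfold Spec_expand_to_tnfn; infer_instance

-- ===== CLAIM =====
def Claim_equal_expand_to_tnfn : Prop := ∀ (pairs : List (String × String × String)), Dom_expand_to_tnfn pairs → Spec_expand_to_tnfn pairs (expand_to_tnfn pairs)

-- ===== LEMMAS AND PROOFS =====
-- Loop invariant: folding A's step from (tn, fn) appends B's recursive result componentwise
theorem tnfn_fold (pairs : List (String × String × String))
    (tn fn : List (List (String × String))) :
    pairs.foldl (fun (acc : List (List (String × String)) × List (List (String × String))) p =>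
      let (_dataset, src, tgt) := p
      if src == tgt then
        (acc.1 ++ [[("src", src), ("tgt", tgt), ("tp_fp_label", "TN")]], acc.2)
      else
        (acc.1 ++ [[("src", tgt), ("tgt", tgt), ("tp_fp_label", "TN")]],
         acc.2 ++ [[("src", src), ("tgt", src), ("tp_fp_label", "FN")]]))
      (tn, fn)
    = (tn ++ (expand_to_tnfn_alt pairs).1, fn ++ (expand_to_tnfn_alt pairs).2) := by
  induction pairs generalizing tn fn with
  | nil => simp [expand_to_tnfn_alt]
  | cons hd tl ih =>
    obtain ⟨d, src, tgt⟩ := hd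
    simp only [List.foldl_cons]
    by_cases h : src = tgt
    · subst h
      rw [if_pos (by simp), ih]
      simp [expand_to_tnfn_alt]
    · rw [if_neg (by simpa using h), ih]
      simp [expand_to_tnfn_alt, h]

-- ===== VERDICT =====
theorem expand_to_tnfn_spec : Claim_equal_expand_to_tnfn := by
  intro pairs _
  unfold Spec_expand_to_tnfn expand_to_tnfn
  simpa using tnfn_fold pairs [] []
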